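-- pv_equiv track=rewrite | github.com/Faanagor/Drawing_tool | test/function_create_canvas_for_testing.py | create_canvas_for_test
-- ===== SOURCE A (Python) =====
-- def create_canvas_for_test(width, height):
--     test_canvas = [x[:] for x in [['  '] * (width + 2)] * (height + 2)]
--     horizontal_wall = '-'
--     vertical_wall = '|'
--     empty_space = ' '
--     for i in range(height + 2):
--         for j in range(width + 2):
--             if i == 0 or i == height + 1:
--                 test_canvas[i][j] = horizontal_wall
--             elif j == 0 or j == width + 1:
--                 test_canvas[i][j] = vertical_wall
--             else:
--                 test_canvas[i][j] = empty_space
--     return test_canvas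
-- ===== SOURCE B (Python) =====
-- def create_canvas_for_test(width, height):
--     border = ['-'] * (width + 2)
--     interior = ['|'] + [' '] * width + ['|']
--     return [list(border) if i == 0 or i == height + 1 else list(interior)
--             for i in range(height + 2)]
-- ===== Notes on version B (the rewrite author's own statement) =====
-- stated objective: simpler
-- what changed: B builds the canvas row by row (one shape decision per row, whole border/interior rows built once by list repetition) instead of A's per-cell double loop with a three-way branch mutating a pre-allocated grid.
-- outside the precondition, e.g. on create_canvas_for_test(-1, 1): A returns [['-'], ['|'], ['-']], B returns [['-'], ['|', '|'], ['-']]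
import Mathlib
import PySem

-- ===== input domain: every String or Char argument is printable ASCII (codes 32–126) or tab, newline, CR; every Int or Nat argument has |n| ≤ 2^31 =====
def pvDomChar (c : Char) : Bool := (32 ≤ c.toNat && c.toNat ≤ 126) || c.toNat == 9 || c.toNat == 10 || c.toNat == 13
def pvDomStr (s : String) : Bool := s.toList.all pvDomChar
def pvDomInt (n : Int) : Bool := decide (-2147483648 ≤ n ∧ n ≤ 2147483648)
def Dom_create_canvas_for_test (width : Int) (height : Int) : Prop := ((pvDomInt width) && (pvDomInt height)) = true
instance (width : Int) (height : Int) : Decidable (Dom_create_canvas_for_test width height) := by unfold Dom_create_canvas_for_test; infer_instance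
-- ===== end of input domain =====

-- B builds the canvas row by row (one shape decision per row, rows built by repetition)
-- instead of A's per-cell double loop mutating a pre-allocated grid; objective: simpler.

-- ===== PORT A =====
def create_canvas_for_test (width : Int) (height : Int) : List (List String) :=
  let test_canvas := List.replicate (height + 2).toNat (List.replicate (width + 2).toNat "  ")
  (PySem.List.pyRange 0 (height + 2) 1).foldl (fun canvas i =>
    (PySem.List.pyRange 0 (width + 2) 1).foldl (fun canvas j =>
      canvas.modify i.toNat (fun row =>
        row.set j.toNat
          (if i = 0 ∨ i = height + 1 then "-"
           else if j = 0 ∨ j = width + 1 then "|"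
           else " "))) canvas) test_canvas

-- ===== PORT B =====
def create_canvas_for_test_alt (width : Int) (height : Int) : List (List String) :=
  let border := List.replicate (width + 2).toNat "-"
  let interior := "|" :: (List.replicate width.toNat " " ++ ["|"])
  (PySem.List.pyRange 0 (height + 2) 1).map (fun i =>
    if i = 0 ∨ i = height + 1 then border else interior)

-- ===== PRECONDITION & SPEC =====
-- Pre_ excludes negative widths combined with height ≥ 1 (an unspecifiable degenerate corner:
-- there A's per-cell loops over empty/negative-size rows produce accidental interior rows like
-- [] or ['|'], while B's natural row shape gives ['|','|']); all other inputs are admitted.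
def Pre_create_canvas_for_test (width : Int) (height : Int) : Prop := 0 ≤ width ∨ height ≤ 0
instance (width : Int) (height : Int) : Decidable (Pre_create_canvas_for_test width height) := by unfold Pre_create_canvas_for_test; infer_instance
def pvWitness_create_canvas_for_test : Int × Int := (3, 2)
def Spec_create_canvas_for_test (width : Int) (height : Int) (out : List (List String)) : Prop := out = create_canvas_for_test_alt width height
instance (width : Int) (height : Int) (out : List (List String)) : Decidable (Spec_create_canvas_for_test width height out) := by unfold Spec_create_canvas_for_test; infer_instance

-- ===== CLAIM (what is proved, stated in full; the proofs are below) =====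
def Claim_equal_create_canvas_for_test : Prop := ∀ (width : Int) (height : Int), Dom_create_canvas_for_test width height → Pre_create_canvas_for_test width height → Spec_create_canvas_for_test width height (create_canvas_for_test width height)

-- ===== LEMMAS AND PROOFS =====

-- modify at the same index composes
theorem pv_modify_modify {α : Type} (l : List α) (k : Nat) (f g : α → α) :
    (l.modify k f).modify k g = l.modify k (fun x => g (f x)) := by
  induction l generalizing k with
  | nil => simp
  | cons a t ih =>
    cases k with
    | zero => simp
    | succ k => simp [ih]

-- a fold of modifications at one fixed index is one modification by the folded function
theorem pv_foldl_modify_fixed {α β : Type} (js : List β) (k : Nat) (F : β → α → α)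
    (c : List α) :
    js.foldl (fun c j => c.modify k (F j)) c
      = c.modify k (fun r => js.foldl (fun r j => F j r) r) := by
  induction js generalizing c with
  | nil =>
    induction c generalizing k with
    | nil => simp
    | cons a t iht =>
      cases k with
      | zero => simp
      | succ k => simpa using iht k
  | cons j js ih =>
    simp only [List.foldl_cons]
    rw [ih, pv_modify_modify]

-- modify just past a prefix
theorem pv_modify_append {α : Type} (l₁ l₂ : List α) (f : α → α) (k : Nat)
    (hk : k = l₁.length) :
    (l₁ ++ l₂).modify k f = l₁ ++ l₂.modify 0 f := by
  subst hk
  induction l₁ with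
  | nil => simp
  | cons a t ih => simp [ih]

-- writing g 0 … g (n-1) into the first n cells of a row
theorem pv_foldl_set_range {α : Type} (g : Nat → α) :
    ∀ (n : Nat) (row : List α), n ≤ row.length →
      (List.range n).foldl (fun r j => r.set j (g j)) row
        = (List.range n).map g ++ row.drop n := by
  intro n
  induction n with
  | zero => simp
  | succ n ih =>
    intro row hlen
    have hn : n < row.length := Nat.lt_of_lt_of_le (Nat.lt_succ_self n) hlen
    rw [List.range_succ, List.foldl_append, ih row (Nat.le_of_lt hn)]
    simp only [List.foldl_cons, List.foldl_nil]
    rw [List.drop_eq_getElem_cons hn]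
    rw [List.set_append_right _ _ (by simp)]
    simp only [List.length_map, List.length_range, Nat.sub_self, List.set_cons_zero,
      List.map_append, List.map_cons, List.map_nil]
    simp

-- the outer loop on a replicated grid: each row i becomes F i applied to the fresh row r
theorem pv_foldl_modify_range {α : Type} (F : Nat → α → α) (r : α) :
    ∀ (n m : Nat), n ≤ m →
      (List.range n).foldl (fun c i => c.modify i (F i)) (List.replicate m r)
        = (List.range n).map (fun i => F i r) ++ List.replicate (m - n) r := by
  intro n
  induction n with
  | zero => simp
  | succ n ih =>
    intro m hnm
    have hn : n < m := Nat.lt_of_lt_of_le (Nat.lt_succ_self n) hnm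
    rw [List.range_succ, List.foldl_append, ih m (Nat.le_of_lt hn)]
    simp only [List.foldl_cons, List.foldl_nil]
    have hrep : List.replicate (m - n) r = r :: List.replicate (m - (n + 1)) r := by
      have : m - n = (m - (n + 1)) + 1 := by omega
      rw [this, List.replicate_succ]
    rw [hrep, pv_modify_append _ _ _ _ (by simp)]
    simp

-- a border row: every cell of a length-n row is overwritten with v
theorem pv_border_row {α : Type} (v : α) (n : Nat) (row : List α) (h : row.length = n) :
    (List.range n).foldl (fun r j => r.set j v) row = List.replicate n v := by
  rw [pv_foldl_set_range (fun _ => v) n row (le_of_eq h.symm),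
    List.drop_eq_nil_of_le (le_of_eq h)]
  simp [List.map_const']

-- an interior row of B's shape, written as A computes it cell by cell
theorem pv_interior_row (width : Int) (w : Nat) (hw : (w : Int) = width) :
    (List.range (w + 2)).map
        (fun j : Nat => if (j : Int) = 0 ∨ (j : Int) = width + 1 then "|" else " ")
      = "|" :: (List.replicate w " " ++ ["|"]) := by
  rw [List.range_succ, List.map_append, List.range_succ_eq_map, List.map_cons, List.map_map]
  have hlast : ((w + 1 : Nat) : Int) = width + 1 := by omega
  rw [List.map_congr_left (g := fun _ : Nat => " ") (by
    intro j hj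
    have hjw : j < w := List.mem_range.mp hj
    simp [Function.comp]
    constructor <;> omega)]
  simp [hlast, List.map_const']

-- ===== VERDICT (by name: the statement is the Claim_ definition above) =====
theorem create_canvas_for_test_spec : Claim_equal_create_canvas_for_test := by
  unfold Claim_equal_create_canvas_for_test
  intro width height _ hpre
  unfold Spec_create_canvas_for_test create_canvas_for_test create_canvas_for_test_alt
  by_cases hH : height + 2 ≤ 0
  · rw [PySem.List.pyRange_one_eq_nil hH]
    simp [Int.toNat_of_nonpos hH]
  · push_neg at hH
    set n : Nat := (height + 2).toNat with hn
    have hcast : ((n : Int)) = height + 2 := Int.toNat_of_nonneg (le_of_lt hH)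
    have hrange : PySem.List.pyRange 0 (height + 2) 1
        = (List.range n).map (fun k : Nat => (k : Int)) := by
      rw [PySem.List.pyRange_one]
      simp only [Int.sub_zero, zero_add]
      rw [← hn]
    rw [hrange, List.foldl_map, List.map_map]
    have hinner : ∀ (c : List (List String)) (k : Nat),
        (PySem.List.pyRange 0 (width + 2) 1).foldl (fun canvas j =>
          canvas.modify ((k : Int)).toNat (fun row =>
            row.set j.toNat
              (if (k : Int) = 0 ∨ (k : Int) = height + 1 then "-"
               else if j = 0 ∨ j = width + 1 then "|"
               else " "))) c
        = c.modify k (fun row =>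
            (PySem.List.pyRange 0 (width + 2) 1).foldl (fun row j =>
              row.set j.toNat
                (if (k : Int) = 0 ∨ (k : Int) = height + 1 then "-"
                 else if j = 0 ∨ j = width + 1 then "|"
                 else " ")) row) := by
      intro c k
      rw [pv_foldl_modify_fixed, Int.toNat_natCast]
    simp only [hinner]
    rw [pv_foldl_modify_range _ _ n n (Nat.le_refl n)]
    simp only [Nat.sub_self, List.replicate_zero, List.append_nil]
    apply List.map_congr_left
    intro k hk
    have hkn : k < n := List.mem_range.mp hk
    simp only [Function.comp_apply]
    by_cases hb : (k : Int) = 0 ∨ (k : Int) = height + 1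
    · -- border row
      rw [if_pos hb]
      simp only [if_pos hb]
      by_cases hW : width + 2 ≤ 0
      · rw [PySem.List.pyRange_one_eq_nil hW]
        simp [Int.toNat_of_nonpos hW]
      · push_neg at hW
        set w2 : Nat := (width + 2).toNat with hw2
        have hrangeW : PySem.List.pyRange 0 (width + 2) 1
            = (List.range w2).map (fun k : Nat => (k : Int)) := by
          rw [PySem.List.pyRange_one]
          simp only [Int.sub_zero, zero_add]
          rw [← hw2]
        rw [hrangeW, List.foldl_map]
        simp only [Int.toNat_natCast]
        exact pv_border_row "-" w2 _ (by simp)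
    · -- interior row: 1 ≤ k ≤ height, so Pre_ forces 0 ≤ width
      rw [if_neg hb]
      simp only [if_neg hb]
      push_neg at hb
      obtain ⟨hb0, hb1⟩ := hb
      have hbneg : ¬((k : Int) = 0 ∨ (k : Int) = height + 1) := not_or.mpr ⟨hb0, hb1⟩
      have hwpos : 0 ≤ width := by
        rcases hpre with h | h
        · exact h
        · exfalso; omega
      set w : Nat := width.toNat with hw
      have hwc : ((w : Int)) = width := Int.toNat_of_nonneg hwpos
      have hW2 : (width + 2).toNat = w + 2 := by omega
      have hrangeW : PySem.List.pyRange 0 (width + 2) 1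
          = (List.range (w + 2)).map (fun k : Nat => (k : Int)) := by
        rw [PySem.List.pyRange_one]
        simp only [Int.sub_zero, zero_add]
        rw [hW2]
      rw [hrangeW, List.foldl_map]
      simp only [Int.toNat_natCast]
      rw [pv_foldl_set_range _ (w + 2) _ (by simp [hW2]),
        List.drop_eq_nil_of_le (by simp [hW2]), List.append_nil]
      exact pv_interior_row width w hwc
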